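-- pv_equiv track=rewrite | github.com/josteinl/advent2021 | day12/main.py | remove2
-- ===== SOURCE A (Python) =====
-- def remove2(node, sub_paths, use_twice):
--
--     for element in sub_paths.copy():
--         if node in element:
--             if node in ("start", "end"):
--                 sub_paths.remove(element)
--             elif use_twice == node:
--                 use_twice = None
--                 break
--             else:
--                 sub_paths.remove(element)
--
--     return sub_paths, use_twice
-- ===== SOURCE B (Python) =====
-- def remove2(node, sub_paths, use_twice):
--     # Hoisted decision: either we are in "remove all sub-paths containing node" mode
--     # (start/end nodes, or node is not the twice-usable one), or we keep the list and
--     # just consume the use_twice token if any sub-path contains node.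
--     if node in ("start", "end") or use_twice != node:
--         sub_paths[:] = [e for e in sub_paths if node not in e]
--     elif any(node in e for e in sub_paths):
--         use_twice = None
--     return sub_paths, use_twice
-- ===== Notes on version B (the rewrite author's own statement) =====
-- stated objective: simpler
-- what changed: Replaces the per-element loop with repeated list.remove and an in-loop break by one up-front case decision: a single filtering pass (slice assignment) in removal mode, or an any() scan that only consumes use_twice; no element-wise remove calls remain.
import Mathlib
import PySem

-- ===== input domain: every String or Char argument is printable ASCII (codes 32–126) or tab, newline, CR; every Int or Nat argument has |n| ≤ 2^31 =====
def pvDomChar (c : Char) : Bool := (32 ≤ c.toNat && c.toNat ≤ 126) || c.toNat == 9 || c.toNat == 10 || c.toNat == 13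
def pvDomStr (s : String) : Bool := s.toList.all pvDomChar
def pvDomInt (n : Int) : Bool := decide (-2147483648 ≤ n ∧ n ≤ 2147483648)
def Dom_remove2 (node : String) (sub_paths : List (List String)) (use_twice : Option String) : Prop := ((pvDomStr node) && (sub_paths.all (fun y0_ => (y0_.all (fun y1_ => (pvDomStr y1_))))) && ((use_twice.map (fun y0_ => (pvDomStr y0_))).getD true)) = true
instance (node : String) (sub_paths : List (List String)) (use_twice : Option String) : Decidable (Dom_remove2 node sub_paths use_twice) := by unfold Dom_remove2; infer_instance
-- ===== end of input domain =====

-- B replaces A's loop (per-element list.remove + break) by one up-front case decision and a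
-- single filter / any() pass; equivalence is about the RETURN value (both Pythons also mutate
-- sub_paths in place to the same final list).

-- ===== PORT A =====
-- the for-loop over sub_paths.copy(); state = (current sub_paths, use_twice); break = return.
-- The .getD fallback of remove? is unreachable: the iterated element always occurs in sub_paths.
def remove2Loop (node : String) : List (List String) → List (List String) → Option String → List (List String) × Option String
  | [], sp, ut => (sp, ut)
  | e :: rest, sp, ut =>
    if node ∈ e then
      if node = "start" ∨ node = "end" then
        remove2Loop node rest ((PySem.List.remove? sp e).getD sp) ut
      else if ut = some node then
        (sp, none)          -- use_twice = None; break
      else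
        remove2Loop node rest ((PySem.List.remove? sp e).getD sp) ut
    else remove2Loop node rest sp ut

def remove2 (node : String) (sub_paths : List (List String)) (use_twice : Option String) : List (List String) × Option String :=
  remove2Loop node sub_paths sub_paths use_twice

-- ===== PORT B =====
def remove2_alt (node : String) (sub_paths : List (List String)) (use_twice : Option String) : List (List String) × Option String :=
  if node = "start" ∨ node = "end" ∨ use_twice ≠ some node then
    (sub_paths.filter (fun e => !(decide (node ∈ e))), use_twice)
  else if sub_paths.any (fun e => decide (node ∈ e)) then
    (sub_paths, none)
  else
    (sub_paths, use_twice)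

-- ===== PRECONDITION & SPEC =====
def Spec_remove2 (node : String) (sub_paths : List (List String)) (use_twice : Option String) (out : List (List String) × Option String) : Prop := out = remove2_alt node sub_paths use_twice
instance (node : String) (sub_paths : List (List String)) (use_twice : Option String) (out : List (List String) × Option String) : Decidable (Spec_remove2 node sub_paths use_twice out) := by unfold Spec_remove2; infer_instance

-- ===== CLAIM (what is proved, stated in full; the proofs are below) =====
def Claim_equal_remove2 : Prop := ∀ (node : String) (sub_paths : List (List String)) (use_twice : Option String), Dom_remove2 node sub_paths use_twice → Spec_remove2 node sub_paths use_twice (remove2 node sub_paths use_twice)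

-- ===== LEMMAS AND PROOFS =====

-- Erasing an element containing node from kept ++ e :: rest, where kept is node-free, drops e.
theorem pv_erase_mid (node : String) (kept rest : List (List String)) (e : List String)
    (hk : ∀ k ∈ kept, node ∉ k) (he : node ∈ e) :
    (kept ++ e :: rest).erase e = kept ++ rest := by
  have hne : e ∉ kept := fun h => hk e h he
  rw [List.erase_append_right _ (by simpa using hne), List.erase_cons_head]

-- Removal mode (node is start/end or use_twice ≠ node): the loop removes exactly the
-- sub-paths containing node, never touching use_twice.
theorem pv_loop_filter (node : String) (ut : Option String)
    (hmode : node = "start" ∨ node = "end" ∨ ut ≠ some node) :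
    ∀ (copy kept : List (List String)), (∀ k ∈ kept, node ∉ k) →
      remove2Loop node copy (kept ++ copy) ut =
        (kept ++ copy.filter (fun e => !(decide (node ∈ e))), ut) := by
  intro copy
  induction copy with
  | nil => intro kept _; simp [remove2Loop]
  | cons e rest ih =>
    intro kept hk
    by_cases he : node ∈ e
    · have hrm : PySem.List.remove? (kept ++ e :: rest) e = some (kept ++ rest) := by
        rw [PySem.List.remove?_eq_some_erase _ e (by simp),
            pv_erase_mid node kept rest e hk he]
      simp only [remove2Loop, he, if_true]
      split_ifs with h1 h2
      · rw [hrm]; simp [ih kept hk, he]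
      · rcases hmode with h | h | h
        · exact absurd (Or.inl h) h1
        · exact absurd (Or.inr h) h1
        · exact absurd h2 h
      · rw [hrm]; simp [ih kept hk, he]
    · have := ih (kept ++ [e]) (by intro k hkm; rcases List.mem_append.1 hkm with h | h
                                   · exact hk k h
                                   · simp_all)
      simp only [List.append_assoc, List.cons_append, List.nil_append] at this
      simp [remove2Loop, he, this]

-- Twice-use mode (node not start/end, use_twice = node): the list is untouched; the loop
-- scans for the first sub-path containing node and, if found, clears use_twice.
theorem pv_loop_scan (node : String) (hs : ¬(node = "start" ∨ node = "end")) :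
    ∀ (copy sp : List (List String)),
      remove2Loop node copy sp (some node) =
        (sp, if copy.any (fun e => decide (node ∈ e)) then none else some node) := by
  intro copy
  induction copy with
  | nil => intro sp; simp [remove2Loop]
  | cons e rest ih =>
    intro sp
    by_cases he : node ∈ e
    · simp [remove2Loop, he, hs]
    · simp [remove2Loop, he, ih sp]

-- ===== VERDICT (by name: the statement is the Claim_ definition above) =====
theorem remove2_spec : Claim_equal_remove2 := by
  intro node sp ut _
  unfold Spec_remove2 remove2 remove2_alt
  by_cases hmode : node = "start" ∨ node = "end" ∨ ut ≠ some node
  · have := pv_loop_filter node ut hmode sp [] (by simp)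
    simpa [hmode] using this
  · rw [not_or, not_or, not_not] at hmode
    obtain ⟨h1, h2, h3⟩ := hmode
    subst h3
    have := pv_loop_scan node (by simp [h1, h2]) sp sp
    by_cases hany : sp.any (fun e => decide (node ∈ e))
    · simp [this, hany, h1, h2]
    · simp [this, hany, h1, h2]
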